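-- pv_equiv track=rewrite | github.com/DanMauVarPal/python_multiprocessing | Daniel_Vargas_R11998328_final_project.py | matrix_slicing
-- ===== SOURCE A (Python) =====
-- def matrix_slicing(procs, rows):
--     # Constant row allocation for all processes
--     base_chunk = rows // procs
--     # Remaining rows in case of imperfect division
--     rem = rows % procs
--
--     # Storing for matrix slices start and end indexes
--     chunk_indexes = []
--     start = 2
--
--     for i in range(procs):
--         size = base_chunk + (1 if i < rem else 0)
--         end = start + size
--         chunk_indexes.append((start, end))
--         start = end
--
--     return chunk_indexes
-- ===== SOURCE B (Python) =====
-- def matrix_slicing(procs, rows):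
--     # Closed-form per-index ranges: min(i, rem) counts earlier processes
--     # that received one extra row, so no running 'start' accumulator is needed.
--     base_chunk = rows // procs
--     rem = rows % procs
--     return [(2 + i * base_chunk + min(i, rem),
--              2 + (i + 1) * base_chunk + min(i + 1, rem))
--             for i in range(procs)]
-- ===== Notes on version B (the rewrite author's own statement) =====
-- stated objective: alternative
-- what changed: Replaces the running 'start' accumulator loop by a list comprehension computing each (start, end) pair in closed form from the index: start = 2 + i*base_chunk + min(i, rem).
import Mathlib
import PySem

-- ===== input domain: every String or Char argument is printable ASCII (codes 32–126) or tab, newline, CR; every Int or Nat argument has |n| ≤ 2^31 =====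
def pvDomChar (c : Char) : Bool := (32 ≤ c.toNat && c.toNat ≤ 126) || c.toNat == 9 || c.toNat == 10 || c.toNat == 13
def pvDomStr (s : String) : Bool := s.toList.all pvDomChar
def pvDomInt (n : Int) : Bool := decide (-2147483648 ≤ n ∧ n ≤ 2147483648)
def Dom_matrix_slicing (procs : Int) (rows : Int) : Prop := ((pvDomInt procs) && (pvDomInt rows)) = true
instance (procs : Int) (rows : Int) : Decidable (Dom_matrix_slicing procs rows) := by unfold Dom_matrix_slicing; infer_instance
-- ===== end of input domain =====

-- B computes each (start, end) range in closed form from its index instead of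
-- carrying a running 'start' accumulator; same cost, different decomposition.

-- ===== PORT A =====
def matrix_slicing (procs : Int) (rows : Int) : List (Int × Int) :=
  let base_chunk := PySem.Int.floordiv rows procs
  let rem := PySem.Int.mod rows procs
  let st := (PySem.List.pyRange 0 procs 1).foldl
    (fun (s : List (Int × Int) × Int) i =>
      let size := base_chunk + (if i < rem then (1 : Int) else 0)
      let e := s.2 + size
      (s.1 ++ [(s.2, e)], e)) ([], 2)
  st.1

-- ===== PORT B =====
def matrix_slicing_alt (procs : Int) (rows : Int) : List (Int × Int) :=
  let base_chunk := PySem.Int.floordiv rows procs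
  let rem := PySem.Int.mod rows procs
  (PySem.List.pyRange 0 procs 1).map (fun i =>
    (2 + i * base_chunk + min i rem, 2 + (i + 1) * base_chunk + min (i + 1) rem))

-- ===== PRECONDITION & SPEC =====
-- Python raises ZeroDivisionError on 'rows // procs' when procs == 0; excluded.
def Pre_matrix_slicing (procs : Int) (rows : Int) : Prop := procs ≠ 0
instance (procs : Int) (rows : Int) : Decidable (Pre_matrix_slicing procs rows) := by unfold Pre_matrix_slicing; infer_instance
def pvWitness_matrix_slicing : Int × Int := (3, 10)

def Spec_matrix_slicing (procs : Int) (rows : Int) (out : List (Int × Int)) : Prop := out = matrix_slicing_alt procs rows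
instance (procs : Int) (rows : Int) (out : List (Int × Int)) : Decidable (Spec_matrix_slicing procs rows out) := by unfold Spec_matrix_slicing; infer_instance

-- ===== CLAIM (what is proved, stated in full; the proofs are below) =====
def Claim_equal_matrix_slicing : Prop := ∀ (procs : Int) (rows : Int), Dom_matrix_slicing procs rows → Pre_matrix_slicing procs rows → Spec_matrix_slicing procs rows (matrix_slicing procs rows)

-- ===== LEMMAS AND PROOFS =====

-- invariant of A's loop over range(0, n): the accumulated list is B's map, and
-- the carried 'start' equals 2 + n*base + min(n, rem)
theorem pv_loop_eq (base rem : Int) (hrem : 0 ≤ rem) (n : Nat) :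
    ((PySem.List.pyRange 0 (n : Int) 1).foldl
      (fun (s : List (Int × Int) × Int) i =>
        (s.1 ++ [(s.2, s.2 + (base + if i < rem then (1 : Int) else 0))],
         s.2 + (base + if i < rem then (1 : Int) else 0))) ([], 2))
    = ((PySem.List.pyRange 0 (n : Int) 1).map (fun i =>
        (2 + i * base + min i rem, 2 + (i + 1) * base + min (i + 1) rem)),
       2 + (n : Int) * base + min (n : Int) rem) := by
  induction n with
  | zero => simp [PySem.List.pyRange_one_eq_nil, min_eq_left hrem]
  | succ n ih =>
      have h1 : ((n : Int) + 1 : Int) = ((n + 1 : Nat) : Int) := by push_cast; ring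
      have hsplit : PySem.List.pyRange 0 ((n + 1 : Nat) : Int) 1
          = PySem.List.pyRange 0 (n : Int) 1 ++ [(n : Int)] := by
        rw [← h1, PySem.List.pyRange_one_succ_right (by positivity)]
      rw [hsplit, List.foldl_append, List.map_append, ih]
      simp only [List.foldl_cons, List.foldl_nil, List.map_cons, List.map_nil]
      refine Prod.ext ?_ ?_
      · simp only
        congr 1
        have hmin : min ((n : Int) + 1) rem = min (n : Int) rem + (if (n : Int) < rem then (1 : Int) else 0) := by
          split_ifs with h <;> omega
        rw [hmin]; ring_nf
      · simp only
        have hmin : min (((n + 1 : Nat) : Int)) rem = min (n : Int) rem + (if (n : Int) < rem then (1 : Int) else 0) := by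
          split_ifs with h <;> push_cast <;> omega
        rw [hmin]; push_cast; ring

-- ===== VERDICT (by name: the statement is the Claim_ definition above) =====
theorem matrix_slicing_spec : Claim_equal_matrix_slicing := by
  intro procs rows _ hpre
  unfold Spec_matrix_slicing matrix_slicing matrix_slicing_alt
  rcases lt_trichotomy procs 0 with h | h | h
  · rw [PySem.List.pyRange_one_eq_nil (by omega)]
    simp
  · exact absurd h hpre
  · have hn : procs = ((procs.toNat : Nat) : Int) := by omega
    have hrem : 0 ≤ PySem.Int.mod rows ((procs.toNat : Nat) : Int) :=
      hn ▸ PySem.Int.mod_nonneg _ h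
    simp only
    rw [hn, pv_loop_eq _ _ hrem]
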